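-- pv_equiv track=rewrite | github.com/jkendric/storyteller-app | backend/app/services/tts/kokoro.py | _voice_id_to_dict
-- ===== SOURCE A (Python) =====
-- def _voice_id_to_dict(voice_id: str) -> dict:
--     """Convert a voice ID string to a dict with name/language/gender."""
--     # Parse Kokoro voice ID format: {lang_prefix}_{name}
--     # e.g., af_bella -> American Female Bella
--     voice_info = {"id": voice_id, "name": voice_id}
--
--     # Known voice prefixes
--     prefixes = {
--         "af_": ("American Female", "en-US", "female"),
--         "am_": ("American Male", "en-US", "male"),
--         "bf_": ("British Female", "en-GB", "female"),
--         "bm_": ("British Male", "en-GB", "male"),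
--     }
--
--     for prefix, (type_name, language, gender) in prefixes.items():
--         if voice_id.startswith(prefix):
--             name_part = voice_id[len(prefix):].replace("_", " ").title()
--             voice_info["name"] = f"{name_part} ({type_name})"
--             voice_info["language"] = language
--             voice_info["gender"] = gender
--             break
--
--     return voice_info
-- ===== SOURCE B (Python) =====
-- def _voice_id_to_dict(voice_id: str) -> dict:
--     """Convert a voice ID string to a dict with name/language/gender."""
--     # Decompose the prefix into its two components instead of scanning a prefix table.
--     region = {"a": ("American", "en-US"), "b": ("British", "en-GB")}
--     gender = {"f": "female", "m": "male"}
--     r = region.get(voice_id[0:1])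
--     g = gender.get(voice_id[1:2])
--     if r and g and voice_id[2:3] == "_":
--         region_word, language = r
--         name = voice_id[3:].replace("_", " ").title()
--         return {
--             "id": voice_id,
--             "name": f"{name} ({region_word} {g.title()})",
--             "language": language,
--             "gender": g,
--         }
--     return {"id": voice_id, "name": voice_id}
-- ===== Notes on version B (the rewrite author's own statement) =====
-- stated objective: simpler
-- what changed: Replaces the four-entry prefix table and its startswith scan loop with two one-letter component maps (region, gender) looked up by slicing the first characters and composing the display name.
import Mathlib
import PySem

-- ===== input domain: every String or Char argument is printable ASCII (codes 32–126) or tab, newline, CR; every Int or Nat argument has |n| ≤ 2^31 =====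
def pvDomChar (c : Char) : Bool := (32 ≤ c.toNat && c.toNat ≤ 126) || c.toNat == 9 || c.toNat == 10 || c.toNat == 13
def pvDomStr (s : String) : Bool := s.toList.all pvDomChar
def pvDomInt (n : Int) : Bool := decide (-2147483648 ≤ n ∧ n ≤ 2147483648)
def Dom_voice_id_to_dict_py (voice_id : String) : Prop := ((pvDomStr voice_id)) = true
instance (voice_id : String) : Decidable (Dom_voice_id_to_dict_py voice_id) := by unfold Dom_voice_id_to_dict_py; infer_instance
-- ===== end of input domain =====

-- B replaces A's four-entry prefix table and its scan loop by two one-letter component maps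
-- (region, gender) composed by slicing; objective: simpler.

-- shared helper: Python str.title(), exact on the ASCII domain (a letter is
-- title-cased after a non-letter, lower-cased after a letter; both Pythons call it)
def pyTitleGo : Bool → List Char → List Char
  | _, [] => []
  | prev, c :: rest =>
    if PySem.Chars.isalpha c then
      (if prev then PySem.Chars.lowerChar c else PySem.Chars.upperChar c) :: pyTitleGo true rest
    else
      c :: pyTitleGo false rest

def pyTitle (cs : List Char) : List Char := pyTitleGo false cs

-- ===== PORT A =====
-- the for-loop over the prefix table, with `break` = stop at the first match
def loopA (voice_id : String) :
    List (String × String × String × String) →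
    PySem.Dict String String → PySem.Dict String String
  | [], d => d
  | (pfx, tn, lang, g) :: rest, d =>
    if PySem.Chars.startswith voice_id.toList pfx.toList then
      let name_part :=
        pyTitle (PySem.Chars.replace
          (PySem.List.slice voice_id.toList (some (PySem.Str.len pfx)) none) ['_'] [' '])
      ((d.insert "name" (String.ofList (name_part ++ (' ' :: '(' :: tn.toList ++ [')'])))).insert
        "language" lang).insert "gender" g
    else
      loopA voice_id rest d

def voice_id_to_dict_py (voice_id : String) : List (String × String) :=
  let voice_info : PySem.Dict String String :=
    (PySem.Dict.empty.insert "id" voice_id).insert "name" voice_id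
  let prefixes : List (String × String × String × String) :=
    [("af_", "American Female", "en-US", "female"),
     ("am_", "American Male", "en-US", "male"),
     ("bf_", "British Female", "en-GB", "female"),
     ("bm_", "British Male", "en-GB", "male")]
  (loopA voice_id prefixes voice_info).items

-- ===== PORT B =====
def voice_id_to_dict_py_alt (voice_id : String) : List (String × String) :=
  let cs := voice_id.toList
  let region : PySem.Dict String (String × String) :=
    PySem.Dict.ofList [("a", ("American", "en-US")), ("b", ("British", "en-GB"))]
  let gender : PySem.Dict String String :=
    PySem.Dict.ofList [("f", "female"), ("m", "male")]
  let r := region.get? (String.ofList (PySem.List.slice cs (some 0) (some 1)))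
  let g := gender.get? (String.ofList (PySem.List.slice cs (some 1) (some 2)))
  match r, g with
  | some (region_word, language), some gw =>
    if PySem.List.slice cs (some 2) (some 3) = ['_'] then
      let name := pyTitle (PySem.Chars.replace (PySem.List.slice cs (some 3) none) ['_'] [' '])
      [("id", voice_id),
       ("name", String.ofList (name ++ (' ' :: '(' :: region_word.toList ++ ' ' :: pyTitle gw.toList ++ [')']))),
       ("language", language),
       ("gender", gw)]
    else
      [("id", voice_id), ("name", voice_id)]
  | _, _ => [("id", voice_id), ("name", voice_id)]

-- ===== PRECONDITION & SPEC =====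
def Spec_voice_id_to_dict_py (voice_id : String) (out : List (String × String)) : Prop := out = voice_id_to_dict_py_alt voice_id
instance (voice_id : String) (out : List (String × String)) : Decidable (Spec_voice_id_to_dict_py voice_id out) := by unfold Spec_voice_id_to_dict_py; infer_instance

-- ===== CLAIM (what is proved, stated in full; the proofs are below) =====
def Claim_equal_voice_id_to_dict_py : Prop := ∀ (voice_id : String), Dom_voice_id_to_dict_py voice_id → Spec_voice_id_to_dict_py voice_id (voice_id_to_dict_py voice_id)

-- ===== LEMMAS AND PROOFS =====

lemma beq_ofList_singleton (c d : Char) :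
    (String.ofList [c] == String.ofList [d]) = (c == d) := by
  by_cases h : c = d
  · subst h; simp
  · have hne : String.ofList [c] ≠ String.ofList [d] := by
      intro he
      exact h (by simpa using congrArg String.toList he)
    simp [h, hne]

lemma beq_lit_a (c : Char) : (("a" : String) == String.ofList [c]) = (c == 'a') := by
  rw [beq_ofList_singleton 'a' c, Bool.beq_comm]

lemma beq_lit_b (c : Char) : (("b" : String) == String.ofList [c]) = (c == 'b') := by
  rw [beq_ofList_singleton 'b' c, Bool.beq_comm]

lemma beq_lit_f (c : Char) : (("f" : String) == String.ofList [c]) = (c == 'f') := by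
  rw [beq_ofList_singleton 'f' c, Bool.beq_comm]

lemma beq_lit_m (c : Char) : (("m" : String) == String.ofList [c]) = (c == 'm') := by
  rw [beq_ofList_singleton 'm' c, Bool.beq_comm]

lemma find?_region (c : Char) :
    List.find? (fun p => p.1 == String.ofList [c])
      [(("a" : String), (("American" : String), ("en-US" : String))), ("b", ("British", "en-GB"))] =
      (if c = 'a' then some ("a", ("American", "en-US"))
       else if c = 'b' then some ("b", ("British", "en-GB")) else none) := by
  by_cases ha : c = 'a'
  · subst ha; rfl
  · by_cases hb : c = 'b'
    · subst hb; rfl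
    · simp [List.find?, beq_lit_a, beq_lit_b,
        show (c == 'a') = false by simp [ha], show (c == 'b') = false by simp [hb], ha, hb]

lemma find?_gender (c : Char) :
    List.find? (fun p => p.1 == String.ofList [c])
      [(("f" : String), ("female" : String)), ("m", "male")] =
      (if c = 'f' then some ("f", "female")
       else if c = 'm' then some ("m", "male") else none) := by
  by_cases hf : c = 'f'
  · subst hf; rfl
  · by_cases hm : c = 'm'
    · subst hm; rfl
    · simp [List.find?, beq_lit_f, beq_lit_m,
        show (c == 'f') = false by simp [hf], show (c == 'm') = false by simp [hm], hf, hm]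

set_option maxHeartbeats 2000000 in
set_option maxRecDepth 100000 in
theorem key_lemma (voice_id : String) :
    voice_id_to_dict_py voice_id = voice_id_to_dict_py_alt voice_id := by
  unfold voice_id_to_dict_py voice_id_to_dict_py_alt loopA
  rcases h : voice_id.toList with _ | ⟨c0, _ | ⟨c1, _ | ⟨c2, rest⟩⟩⟩ <;>
    simp_all [PySem.Chars.startswith, PySem.List.slice, PySem.Dict.ofList, PySem.Dict.get?,
      PySem.Dict.insert, PySem.Dict.empty, loopA, PySem.Str.len]
  case nil => split <;> rfl
  case cons.nil => split <;> rfl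
  case cons.cons.nil => split <;> rfl
  case cons.cons.cons =>
    by_cases h0 : c0 = 'a' <;> by_cases h1 : c0 = 'b' <;>
      by_cases h2 : c1 = 'f' <;> by_cases h3 : c1 = 'm' <;> by_cases h4 : c2 = '_' <;>
      (try subst_vars) <;>
      (try simp_all [beq_lit_a, beq_lit_b, beq_lit_f, beq_lit_m, ne_comm,
        show ((PySem.Dict.mk ([] : List (String × String × String))).update
            [("a", ("American", "en-US")), ("b", ("British", "en-GB"))]).items =
          [("a", ("American", "en-US")), ("b", ("British", "en-GB"))] from rfl,
        show ((PySem.Dict.mk ([] : List (String × String))).update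
            [("f", "female"), ("m", "male")]).items = [("f", "female"), ("m", "male")] from rfl,
        find?_region, find?_gender]) <;>
      (try simp_all [show ('_' : Char) ≠ c2 from fun he => h4 he.symm]) <;>
      (try simp_all [show ('f' : Char) ≠ c1 from fun he => h2 he.symm]) <;>
      (try simp_all [show ('m' : Char) ≠ c1 from fun he => h3 he.symm]) <;>
      (try simp_all [show ('a' : Char) ≠ c0 from fun he => h0 he.symm]) <;>
      (try simp_all [show ('b' : Char) ≠ c0 from fun he => h1 he.symm]) <;>
      (try rfl)

-- ===== VERDICT (by name: the statement is the Claim_ definition above) =====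
theorem voice_id_to_dict_py_spec : Claim_equal_voice_id_to_dict_py := by
  intro v _
  unfold Spec_voice_id_to_dict_py
  exact key_lemma v
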